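-- pv_equiv track=rewrite | github.com/hpc4geo/iPOD-SeisSol | py-rom-tools/romutils/param_maps.py | list_of_dicts_filter
-- ===== SOURCE A (Python) =====
-- def list_of_dicts_filter(ld, range):
--   """
--   Filter entries from ld which are outside the bounds specified by range.
--
--   range (input)
--     - A dict() specifying parameter (key) and its allowed [min, max] values (value)
--
--   result (output)
--     - A list containing entries from `ld` which are contained within the bounds specified by `range`.
--   """
--
--   result = list()
--
--   # Get keys and check that at least one key in range is found in ld
--   keys = list(ld[0].keys())
--   key_filter = list(range.keys())
--   matches = False
--   for kf in key_filter:
--     if kf in keys: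
--       matches = True
--   if matches == False:
--     msg = 'The range filter did not contain any parameters (keys) defined in `ld`. This likely indicates an error.\n'
--     msg += 'Please inspect input:\n' + '  `ld` = ' + str(ld) + '\n' + '  `range` = ' + str(range)
--     raise RuntimeError(msg)
--
--   for d in ld:
--     keep_item = True
--     # Test parameter against all specified bounds.
--     # If a value violates any bound, mark dict() not to be kept (i.e. keep_item = False)
--     for kf in key_filter:
--       if kf in keys:
--         value = d[kf]
--         bounds = range[kf]
--         if value < bounds[0]:
--           keep_item = False
--           break
--         if value > bounds[1]:
--           keep_item = False
--           break
--     if keep_item: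
--       result.append(d)
--
--   return result
-- ===== SOURCE B (Python) =====
-- def list_of_dicts_filter(ld, range):
--   """Key-major re-implementation: same preamble, then one filtering pass per
--   active filter key over a shrinking candidate list."""
--   keys = list(ld[0].keys())
--   active = [kf for kf in range.keys() if kf in keys]
--   if not active:
--     msg = 'The range filter did not contain any parameters (keys) defined in `ld`. This likely indicates an error.\n'
--     msg += 'Please inspect input:\n' + '  `ld` = ' + str(ld) + '\n' + '  `range` = ' + str(range)
--     raise RuntimeError(msg)
--   result = list(ld)
--   for kf in active:
--     lo, hi = range[kf][0], range[kf][1]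
--     result = [d for d in result if lo <= d[kf] <= hi]
--   return result
-- ===== Notes on version B (the rewrite author's own statement) =====
-- stated objective: alternative
-- what changed: Replaces A's item-major pass (per-dict keep flag with an inner break over the filter keys) by a key-major decomposition: one list-comprehension filter per active filter key over a shrinking candidate list, with the bounds looked up once per key instead of once per surviving (dict, key) pair.
-- outside the precondition, e.g. on list_of_dicts_filter([{'a': -1, 'b': -2}], {'b': [2]}): A returns [], B raises IndexError
import Mathlib
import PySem

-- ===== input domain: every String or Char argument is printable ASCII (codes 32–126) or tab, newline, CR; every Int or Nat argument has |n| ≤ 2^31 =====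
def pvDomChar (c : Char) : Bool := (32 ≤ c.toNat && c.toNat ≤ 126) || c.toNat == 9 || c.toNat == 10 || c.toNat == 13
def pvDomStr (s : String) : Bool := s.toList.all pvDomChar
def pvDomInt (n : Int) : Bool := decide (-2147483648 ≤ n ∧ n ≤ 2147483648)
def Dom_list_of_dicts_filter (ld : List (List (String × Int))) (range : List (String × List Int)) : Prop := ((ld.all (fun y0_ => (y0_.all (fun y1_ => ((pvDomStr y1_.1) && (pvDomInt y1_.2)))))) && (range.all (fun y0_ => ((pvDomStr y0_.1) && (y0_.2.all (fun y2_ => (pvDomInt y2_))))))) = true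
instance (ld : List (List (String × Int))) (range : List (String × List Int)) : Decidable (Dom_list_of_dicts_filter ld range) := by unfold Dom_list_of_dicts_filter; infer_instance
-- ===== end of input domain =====

-- B replaces A's item-major pass (per-dict keep flag with break) by a key-major pass:
-- one shrinking filter of the candidate list per active filter key (objective: alternative
-- decomposition, same asymptotic cost). Equivalence is about the RETURN value; Pre_ excludes
-- the inputs where either Python raises.

-- ===== PORT A =====
-- value < bounds[0] / value > bounds[1] check for one key, as A performs it
-- (lookups that would raise in Python — d[kf] KeyError, bounds[0]/bounds[1] IndexError —
-- yield `false`; Pre_ excludes those inputs).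
def pvCheckA (range : List (String × List Int)) (d : List (String × Int)) (kf : String) : Bool :=
  match List.lookup kf d, List.lookup kf range with
  | some value, some bounds =>
    match bounds[0]?, bounds[1]? with
    | some b0, some b1 => if value < b0 then false else if value > b1 then false else true
    | _, _ => false
  | _, _ => false

-- A's inner 'for kf in key_filter' loop with its break, for one dict d
def pvKeepLoopA (keys : List String) (range : List (String × List Int))
    (d : List (String × Int)) : List String → Bool
  | [] => true
  | kf :: rest =>
    if kf ∈ keys then
      if pvCheckA range d kf then pvKeepLoopA keys range d rest else false
    else pvKeepLoopA keys range d rest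

def list_of_dicts_filter (ld : List (List (String × Int))) (range : List (String × List Int)) : List (List (String × Int)) :=
  match ld with
  | [] => []  -- ld[0] raises IndexError; excluded by Pre_
  | d0 :: _ =>
    let keys := d0.map (·.1)
    let key_filter := range.map (·.1)
    let matched := key_filter.foldl (fun m kf => if kf ∈ keys then true else m) false
    if matched = false then []  -- the RuntimeError; excluded by Pre_
    else
      ld.foldl (fun result d =>
        if pvKeepLoopA keys range d key_filter then result ++ [d] else result) []

-- ===== PORT B =====
-- lo <= d[kf] <= hi for one key (raising lookups yield `false`; excluded by Pre_)
def pvCheckB (range : List (String × List Int)) (kf : String) (d : List (String × Int)) : Bool :=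
  match List.lookup kf range with
  | some bounds =>
    match bounds[0]?, bounds[1]? with
    | some lo, some hi =>
      match List.lookup kf d with
      | some v => decide (lo ≤ v) && decide (v ≤ hi)
      | none => false
    | _, _ => false
  | none => false

def list_of_dicts_filter_alt (ld : List (List (String × Int))) (range : List (String × List Int)) : List (List (String × Int)) :=
  match ld with
  | [] => []  -- ld[0] raises IndexError; excluded by Pre_
  | d0 :: _ =>
    let keys := d0.map (·.1)
    let active := (range.map (·.1)).filter (fun kf => decide (kf ∈ keys))
    if active = [] then []  -- the RuntimeError; excluded by Pre_
    else
      active.foldl (fun result kf => result.filter (pvCheckB range kf)) ld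

-- ===== PRECONDITION & SPEC =====
-- Pre_ excludes the inputs where a Python run raises: empty ld (IndexError), no filter key
-- present in ld[0] (RuntimeError), and any active filter key whose bounds list has fewer than
-- 2 entries or which is missing from some dict (IndexError/KeyError). This is slightly
-- narrower than 'A returns': A's per-dict break can skip a missing key or short bounds list —
-- an artefact of evaluation order on which B's key-major pass may itself raise.
def Pre_list_of_dicts_filter (ld : List (List (String × Int))) (range : List (String × List Int)) : Prop :=
  ld ≠ [] ∧
  (∃ kf ∈ range.map (·.1), kf ∈ ld.headI.map (·.1)) ∧
  (∀ kf ∈ range.map (·.1), kf ∈ ld.headI.map (·.1) →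
    2 ≤ ((List.lookup kf range).getD []).length ∧
    ∀ d ∈ ld, (List.lookup kf d).isSome)
instance (ld : List (List (String × Int))) (range : List (String × List Int)) : Decidable (Pre_list_of_dicts_filter ld range) := by unfold Pre_list_of_dicts_filter; infer_instance

def pvWitness_list_of_dicts_filter : (List (List (String × Int))) × (List (String × List Int)) :=
  ([[("a", 1), ("b", 5)], [("a", 7), ("b", 0)]], [("a", [0, 3])])

def Spec_list_of_dicts_filter (ld : List (List (String × Int))) (range : List (String × List Int)) (out : List (List (String × Int))) : Prop := out = list_of_dicts_filter_alt ld range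
instance (ld : List (List (String × Int))) (range : List (String × List Int)) (out : List (List (String × Int))) : Decidable (Spec_list_of_dicts_filter ld range out) := by unfold Spec_list_of_dicts_filter; infer_instance

-- ===== CLAIM (what is proved, stated in full; the proofs are below) =====
def Claim_equal_list_of_dicts_filter : Prop := ∀ (ld : List (List (String × Int))) (range : List (String × List Int)), Dom_list_of_dicts_filter ld range → Pre_list_of_dicts_filter ld range → Spec_list_of_dicts_filter ld range (list_of_dicts_filter ld range)

-- ===== LEMMAS AND PROOFS =====

-- the two per-key checks agree (both are false where a Python lookup would raise)
theorem pvCheck_eq (range : List (String × List Int)) (d : List (String × Int)) (kf : String) :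
    pvCheckA range d kf = pvCheckB range kf d := by
  unfold pvCheckA pvCheckB
  cases hr : List.lookup kf range <;> cases hd : List.lookup kf d <;> simp only []
  case some.none bounds =>
    cases h0 : bounds[0]? <;> cases h1 : bounds[1]? <;> rfl
  case some.some bounds v =>
    cases h0 : bounds[0]? <;> cases h1 : bounds[1]? <;>
      first | rfl | (simp only []; split_ifs with ha hb <;> simp <;> omega)

-- A's inner loop with break equals 'all checks pass' over the key list
theorem pvKeepLoopA_eq_all (keys : List String) (range : List (String × List Int))
    (d : List (String × Int)) (kfs : List String) :
    pvKeepLoopA keys range d kfs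
      = kfs.all (fun kf => if kf ∈ keys then pvCheckB range kf d else true) := by
  induction kfs with
  | nil => rfl
  | cons kf rest ih =>
    simp only [pvKeepLoopA, List.all_cons, ih, pvCheck_eq]
    by_cases h : kf ∈ keys
    · simp only [if_pos h]
      cases pvCheckB range kf d <;> simp
    · simp [h]

-- sequential filters equal one filter by the conjunction of the predicates
theorem foldl_filter_eq_filter_all {α β : Type} (p : β → α → Bool) (kfs : List β) (l : List α) :
    kfs.foldl (fun res kf => res.filter (p kf)) l
      = l.filter (fun d => kfs.all (fun kf => p kf d)) := by
  induction kfs generalizing l with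
  | nil => simp
  | cons kf rest ih =>
    simp only [List.foldl_cons, ih, List.filter_filter, List.all_cons]
    apply List.filter_congr
    intro d _
    cases hp : p kf d <;> cases ha : rest.all (fun kf => p kf d) <;> simp

-- 'all over the filtered key list' = 'all with the membership guard'
theorem all_filter_guard {α : Type} (q : α → Prop) [DecidablePred q] (p : α → Bool) (kfs : List α) :
    (kfs.filter (fun kf => decide (q kf))).all p
      = kfs.all (fun kf => if q kf then p kf else true) := by
  induction kfs with
  | nil => rfl
  | cons kf rest ih => by_cases h : q kf <;> simp [h, ih]

-- A's matches flag is true iff some filter key lies in keys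
theorem matches_foldl_eq_any (keys : List String) (kfs : List String) :
    kfs.foldl (fun m kf => if kf ∈ keys then true else m) false
      = kfs.any (fun kf => decide (kf ∈ keys)) := by
  have h : ∀ (b : Bool), kfs.foldl (fun m kf => if kf ∈ keys then true else m) b
      = (b || kfs.any (fun kf => decide (kf ∈ keys))) := by
    induction kfs with
    | nil => simp
    | cons kf rest ih =>
      intro b
      simp only [List.foldl_cons, List.any_cons]
      rw [ih]
      by_cases hk : kf ∈ keys <;> simp [hk]
  simpa using h false

-- ===== VERDICT (by name: the statement is the Claim_ definition above) =====
theorem list_of_dicts_filter_spec : Claim_equal_list_of_dicts_filter := by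
  intro ld range _ hpre
  obtain ⟨hne, hex, _⟩ := hpre
  unfold Spec_list_of_dicts_filter
  match ld, hne with
  | d0 :: tl, _ =>
    unfold list_of_dicts_filter list_of_dicts_filter_alt
    simp only
    rw [matches_foldl_eq_any]
    have hany : (range.map (·.1)).any (fun kf => decide (kf ∈ d0.map (·.1))) = true := by
      obtain ⟨kf, hkf, hmem⟩ := hex
      simp only [List.headI] at hmem
      exact List.any_eq_true.mpr ⟨kf, hkf, by simpa using hmem⟩
    have hfil : (range.map (·.1)).filter (fun kf => decide (kf ∈ d0.map (·.1))) ≠ [] := by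
      obtain ⟨kf, hkf, hmem⟩ := hex
      simp only [List.headI] at hmem
      intro h
      have := List.filter_eq_nil_iff.mp h kf hkf
      simp [hmem] at this
    rw [if_neg (by simp [hany]), if_neg hfil]
    rw [PySem.List.foldl_append_if_eq_filter]
    rw [foldl_filter_eq_filter_all]
    apply List.filter_congr
    intro d _
    rw [pvKeepLoopA_eq_all, all_filter_guard]
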